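-- pv_equiv track=rewrite | github.com/Terokahi/46FAGs-Arcade | Roguelike/maindotpie.py | fdup_magic
-- ===== SOURCE A (Python) =====
-- def fdup_magic(dir_byte):
--     directions = [(dir_byte >> i) & 1 for i in range(8)]
--     south_east, south, south_west, east, west, north_east, north, north_west = directions
--
--     edge_mask = 0x5a
--     corner_mask = 0xa5
--
--     edge_sum = bin(dir_byte & edge_mask).count('1')
--     corner_sum = bin(dir_byte & corner_mask).count('1')
--
--     if edge_sum == 4:
--         return 'O'
--     elif edge_sum == 3:
--         return '═' if not (west & east) else '║'
--     elif edge_sum == 2: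
--         corner_edges = [
--             ((west & east), '║'),
--             ((north & south), '═'),
--             ((south & east), '╝'),
--             ((south & west), '╚'),
--             ((north & east), '╗'),
--             ((north & west), '╔')
--         ]
--         return next(symbol for case, symbol in corner_edges if case)
--     elif edge_sum == 1:
--         if corner_sum == 0:
--             return '║' if (north | south) else '═'
--         elif corner_sum >= 1:
--             t_edges = [
--                 (north & (south_east | south_west), '╦'),
--                 (south & (north_east | north_west), '╩'),
--                 (west & (north_east | south_east), '╠'),
--                 (east & (north_west | south_west), '╣'),
--                 (north | south, '═'),
--                 (west | east, '║')
--             ]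
--             return next(symbol for case, symbol in t_edges if case)
--     elif edge_sum == 0:
--         if corner_sum == 1:
--             corners = [south_east, south_west, north_east, north_west]
--             return ['╔', '╗', '╚', '╝'][corners.index(1)]
--         elif corner_sum >= 2:
--             if (north_west & south_east) or (north_east & south_west):
--                 return '╬'
--             t_pairs = [
--                 (north_west & north_east, '╩'),
--                 (south_west & south_east, '╦'),
--                 (north_west & south_west, '╣'),
--                 (north_east & south_east, '╠')
--             ]
--             return next(symbol for pair, symbol in t_pairs if pair)
-- ===== SOURCE B (Python) =====
-- # Lookup-table re-implementation: the glyph depends only on the low byte, so it is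
-- # precomputed once for all 256 byte values and returned by a single indexed lookup.
-- # Entry 0 is '' (the original falls through and returns None there; outside Pre_).
--
-- _TABLE = [
--     '', '╔', '║', '═', '╗', '╦', '═', '═', '═', '║', '╝', '╝', '╣', '╣', '╝', '╝',
--     '═', '╠', '╚', '╚', '║', '╠', '╚', '╚', '║', '║', '║', '║', '║', '║', '║', '║',
--     '╚', '╠', '╩', '╩', '╬', '╬', '╩', '╩', '║', '║', '╝', '╝', '╣', '╣', '╝', '╝',
--     '╠', '╠', '╚', '╚', '╠', '╠', '╚', '╚', '║', '║', '║', '║', '║', '║', '║', '║',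
--     '║', '╦', '═', '═', '╦', '╦', '═', '═', '╗', '╗', '═', '═', '╗', '╗', '═', '═',
--     '╔', '╔', '═', '═', '╔', '╔', '═', '═', '║', '║', 'O', 'O', '║', '║', 'O', 'O',
--     '═', '╦', '═', '═', '╦', '╦', '═', '═', '╗', '╗', '═', '═', '╗', '╗', '═', '═',
--     '╔', '╔', '═', '═', '╔', '╔', '═', '═', '║', '║', 'O', 'O', '║', '║', 'O', 'O',
--     '╝', '╬', '╩', '╩', '╣', '╬', '╩', '╩', '╣', '╣', '╝', '╝', '╣', '╣', '╝', '╝',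
--     '║', '╠', '╚', '╚', '║', '╠', '╚', '╚', '║', '║', '║', '║', '║', '║', '║', '║',
--     '╩', '╬', '╩', '╩', '╬', '╬', '╩', '╩', '╣', '╣', '╝', '╝', '╣', '╣', '╝', '╝',
--     '╠', '╠', '╚', '╚', '╠', '╠', '╚', '╚', '║', '║', '║', '║', '║', '║', '║', '║',
--     '═', '╦', '═', '═', '╦', '╦', '═', '═', '╗', '╗', '═', '═', '╗', '╗', '═', '═',
--     '╔', '╔', '═', '═', '╔', '╔', '═', '═', '║', '║', 'O', 'O', '║', '║', 'O', 'O',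
--     '═', '╦', '═', '═', '╦', '╦', '═', '═', '╗', '╗', '═', '═', '╗', '╗', '═', '═',
--     '╔', '╔', '═', '═', '╔', '╔', '═', '═', '║', '║', 'O', 'O', '║', '║', 'O', 'O',
-- ]
--
--
-- def fdup_magic(dir_byte):
--     return _TABLE[dir_byte & 0xFF]
-- ===== Notes on version B (the rewrite author's own statement) =====
-- stated objective: idiomatic
-- what changed: Replaces the bit-mask-and-branch decision tree with a precomputed 256-entry lookup table indexed by the low byte (dir_byte & 0xFF).
-- outside the precondition, e.g. on fdup_magic(0): A returns None, B returns ''; on fdup_magic(256): A returns None, B returns ''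
import Mathlib
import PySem

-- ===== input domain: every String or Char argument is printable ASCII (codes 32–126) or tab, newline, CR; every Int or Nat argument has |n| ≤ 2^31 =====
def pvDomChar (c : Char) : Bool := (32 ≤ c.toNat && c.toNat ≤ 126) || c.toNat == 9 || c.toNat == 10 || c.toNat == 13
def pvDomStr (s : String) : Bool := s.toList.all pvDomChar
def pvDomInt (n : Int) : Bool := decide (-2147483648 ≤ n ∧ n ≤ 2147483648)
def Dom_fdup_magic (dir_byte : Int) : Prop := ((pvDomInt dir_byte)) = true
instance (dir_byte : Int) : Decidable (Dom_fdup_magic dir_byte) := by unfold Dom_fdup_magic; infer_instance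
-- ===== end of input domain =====

-- B replaces A's bit-mask-and-branch decision tree with a precomputed 256-entry lookup
-- table indexed by the low byte (idiomatic; same cost class, no speed claim).

-- ===== PORT A =====
def fdup_magic (dir_byte : Int) : String :=
  -- directions = [(dir_byte >> i) & 1 for i in range(8)], unpacked into the 8 names
  let south_east := PySem.Int.band (dir_byte >>> (0 : Nat)) 1
  let south      := PySem.Int.band (dir_byte >>> (1 : Nat)) 1
  let south_west := PySem.Int.band (dir_byte >>> (2 : Nat)) 1
  let east       := PySem.Int.band (dir_byte >>> (3 : Nat)) 1
  let west       := PySem.Int.band (dir_byte >>> (4 : Nat)) 1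
  let north_east := PySem.Int.band (dir_byte >>> (5 : Nat)) 1
  let north      := PySem.Int.band (dir_byte >>> (6 : Nat)) 1
  let north_west := PySem.Int.band (dir_byte >>> (7 : Nat)) 1
  -- bin(dir_byte & mask).count('1') = PySem.Int.bitCount (exact: Python counts the '1's of |x|)
  let edge_sum   := PySem.Int.bitCount (PySem.Int.band dir_byte 0x5a)
  let corner_sum := PySem.Int.bitCount (PySem.Int.band dir_byte 0xa5)
  if edge_sum = 4 then "O"
  else if edge_sum = 3 then (if PySem.Int.band west east = 0 then "═" else "║")
  else if edge_sum = 2 then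
    -- next(symbol for case, symbol in corner_edges if case); final "" = Python StopIteration (unreachable when edge_sum = 2)
    if PySem.Int.band west east ≠ 0 then "║"
    else if PySem.Int.band north south ≠ 0 then "═"
    else if PySem.Int.band south east ≠ 0 then "╝"
    else if PySem.Int.band south west ≠ 0 then "╚"
    else if PySem.Int.band north east ≠ 0 then "╗"
    else if PySem.Int.band north west ≠ 0 then "╔"
    else ""
  else if edge_sum = 1 then
    if corner_sum = 0 then (if PySem.Int.bor north south ≠ 0 then "║" else "═")
    else if corner_sum ≥ 1 then
      -- next(symbol for case, symbol in t_edges if case); final "" = Python StopIteration (unreachable when edge_sum = 1)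
      if PySem.Int.band north (PySem.Int.bor south_east south_west) ≠ 0 then "╦"
      else if PySem.Int.band south (PySem.Int.bor north_east north_west) ≠ 0 then "╩"
      else if PySem.Int.band west (PySem.Int.bor north_east south_east) ≠ 0 then "╠"
      else if PySem.Int.band east (PySem.Int.bor north_west south_west) ≠ 0 then "╣"
      else if PySem.Int.bor north south ≠ 0 then "═"
      else if PySem.Int.bor west east ≠ 0 then "║"
      else ""
    else ""   -- unreachable (corner_sum : Nat is 0 or ≥ 1)
  else if edge_sum = 0 then
    if corner_sum = 1 then
      let corners := [south_east, south_west, north_east, north_west]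
      -- ['╔', '╗', '╚', '╝'][corners.index(1)]
      match PySem.List.index? corners 1 with
      | some i => (PySem.List.pyGet? ["╔", "╗", "╚", "╝"] (i : Int)).getD ""
      | none => ""   -- Python ValueError (unreachable when corner_sum = 1)
    else if corner_sum ≥ 2 then
      if PySem.Int.band north_west south_east ≠ 0 ∨ PySem.Int.band north_east south_west ≠ 0 then "╬"
      else if PySem.Int.band north_west north_east ≠ 0 then "╩"
      else if PySem.Int.band south_west south_east ≠ 0 then "╦"
      else if PySem.Int.band north_west south_west ≠ 0 then "╣"
      else if PySem.Int.band north_east south_east ≠ 0 then "╠"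
      else ""   -- next(...): Python StopIteration (unreachable when corner_sum ≥ 2)
    else ""   -- corner_sum = 0: Python falls through and returns None (excluded by Pre_)
  else ""   -- unreachable (edge_sum ≤ 4)

-- ===== PORT B =====
-- _TABLE: one glyph per low-byte value; entry 0 is '' (A returns None there, outside Pre_)
def fdupTable : List String :=
  ["", "╔", "║", "═", "╗", "╦", "═", "═", "═", "║", "╝", "╝", "╣", "╣", "╝", "╝",
  "═", "╠", "╚", "╚", "║", "╠", "╚", "╚", "║", "║", "║", "║", "║", "║", "║", "║",
  "╚", "╠", "╩", "╩", "╬", "╬", "╩", "╩", "║", "║", "╝", "╝", "╣", "╣", "╝", "╝",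
  "╠", "╠", "╚", "╚", "╠", "╠", "╚", "╚", "║", "║", "║", "║", "║", "║", "║", "║",
  "║", "╦", "═", "═", "╦", "╦", "═", "═", "╗", "╗", "═", "═", "╗", "╗", "═", "═",
  "╔", "╔", "═", "═", "╔", "╔", "═", "═", "║", "║", "O", "O", "║", "║", "O", "O",
  "═", "╦", "═", "═", "╦", "╦", "═", "═", "╗", "╗", "═", "═", "╗", "╗", "═", "═",
  "╔", "╔", "═", "═", "╔", "╔", "═", "═", "║", "║", "O", "O", "║", "║", "O", "O",
  "╝", "╬", "╩", "╩", "╣", "╬", "╩", "╩", "╣", "╣", "╝", "╝", "╣", "╣", "╝", "╝",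
  "║", "╠", "╚", "╚", "║", "╠", "╚", "╚", "║", "║", "║", "║", "║", "║", "║", "║",
  "╩", "╬", "╩", "╩", "╬", "╬", "╩", "╩", "╣", "╣", "╝", "╝", "╣", "╣", "╝", "╝",
  "╠", "╠", "╚", "╚", "╠", "╠", "╚", "╚", "║", "║", "║", "║", "║", "║", "║", "║",
  "═", "╦", "═", "═", "╦", "╦", "═", "═", "╗", "╗", "═", "═", "╗", "╗", "═", "═",
  "╔", "╔", "═", "═", "╔", "╔", "═", "═", "║", "║", "O", "O", "║", "║", "O", "O",
  "═", "╦", "═", "═", "╦", "╦", "═", "═", "╗", "╗", "═", "═", "╗", "╗", "═", "═",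
  "╔", "╔", "═", "═", "╔", "╔", "═", "═", "║", "║", "O", "O", "║", "║", "O", "O"]

def fdup_magic_alt (dir_byte : Int) : String :=
  -- _TABLE[dir_byte & 0xFF]; the index is always in [0, 255] and the table has 256 entries,
  -- so Python never raises here and the getD "" default is never taken
  (PySem.List.pyGet? fdupTable (PySem.Int.band dir_byte 0xff)).getD ""

-- ===== PRECONDITION & SPEC =====
-- Pre_ excludes exactly the inputs whose low byte is 0: there Python A falls through every
-- branch and returns None, which is not a value of the declared (string) return type.
def Pre_fdup_magic (dir_byte : Int) : Prop := PySem.Int.band dir_byte 0xff ≠ 0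
instance (dir_byte : Int) : Decidable (Pre_fdup_magic dir_byte) := by unfold Pre_fdup_magic; infer_instance

def pvWitness_fdup_magic : Int := (3)

def Spec_fdup_magic (dir_byte : Int) (out : String) : Prop := out = fdup_magic_alt dir_byte
instance (dir_byte : Int) (out : String) : Decidable (Spec_fdup_magic dir_byte out) := by unfold Spec_fdup_magic; infer_instance

-- ===== CLAIM (what is proved, stated in full; the proofs are below) =====
def Claim_equal_fdup_magic : Prop := ∀ (dir_byte : Int), Dom_fdup_magic dir_byte → Pre_fdup_magic dir_byte → Spec_fdup_magic dir_byte (fdup_magic dir_byte)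

-- ===== LEMMAS AND PROOFS =====

-- n &&& m depends only on n's low byte when the mask m fits in a byte
theorem land_mod256 (n m : Nat) (hm : m < 256) : n &&& m = (n % 256) &&& m := by
  apply Nat.eq_of_testBit_eq
  intro i
  by_cases hi : i < 8
  · have h8 : (256 : Nat) = 2 ^ 8 := rfl
    rw [h8, Nat.testBit_and, Nat.testBit_and, Nat.testBit_mod_two_pow]
    simp [hi]
  · have hmi : m.testBit i = false :=
      Nat.testBit_lt_two_pow (lt_of_lt_of_le hm (by calc (256:Nat) = 2^8 := rfl
                             _ ≤ 2^i := Nat.pow_le_pow_right (by norm_num) (by omega)))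
    rw [Nat.testBit_and, Nat.testBit_and, hmi]
    simp

-- evaluation of Python's & on a negative left operand and non-negative right operand
theorem band_negSucc_eval (a : Nat) (b : Int) (hb : 0 ≤ b) :
    PySem.Int.band (Int.negSucc a) b = b - ((b.toNat &&& a : Nat) : Int) := by
  unfold PySem.Int.band
  rw [if_neg (by omega : ¬ (0:Int) ≤ Int.negSucc a), if_pos hb]
  have h1 : (-(Int.negSucc a) - 1) = (a : Int) := by omega
  rw [h1, Int.toNat_natCast]
  have h2 : b.toNat &&& a ≤ b.toNat := Nat.and_le_left
  omega

-- d & m depends only on d mod 256 for a byte-sized mask m (H2 is the byte-level complement identity)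
theorem band_mask_mod (m : Nat) (hm : m < 256)
    (H2 : ∀ u, u < 256 → m - (m &&& u) = (255 - u) &&& m)
    (d : Int) (t : Nat) (ht : t < 256) (h : d % 256 = (t : Int)) :
    PySem.Int.band d ((m : Nat) : Int) = PySem.Int.band ((t : Nat) : Int) ((m : Nat) : Int) := by
  rcases d with n | n
  · rw [Int.ofNat_eq_natCast] at h ⊢
    have hn : n % 256 = t := by omega
    rw [PySem.Int.band_natCast, PySem.Int.band_natCast, land_mod256 n m hm, hn]
  · have ht' : t = 255 - n % 256 := by omega
    have hu : n % 256 < 256 := by omega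
    rw [band_negSucc_eval _ _ (Int.natCast_nonneg m), PySem.Int.band_natCast, Int.toNat_natCast]
    have e1 : m &&& n = m &&& (n % 256) := by
      rw [Nat.land_comm, land_mod256 n m hm, Nat.land_comm]
    have e2 : m - (m &&& (n % 256)) = (255 - n % 256) &&& m := H2 _ hu
    have e3 : t &&& m = (255 - n % 256) &&& m := by rw [ht']
    have h4 : m &&& n ≤ m := Nat.and_le_left
    omega

-- (d >> k) & 1 depends only on d mod 256 for k < 8
theorem bit_mod (k : Nat) (hk : k < 8) (d : Int) (t : Nat) (ht : t < 256) (h : d % 256 = (t : Int)) :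
    PySem.Int.band (d >>> k) 1 = PySem.Int.band (((t : Nat) : Int) >>> k) 1 := by
  have hr : ((t : Int)) >>> k = ((t >>> k : Nat) : Int) := rfl
  rcases d with n | n
  · have hl : (Int.ofNat n) >>> k = ((n >>> k : Nat) : Int) := rfl
    rw [hl, hr, show ((1:Int)) = ((1:Nat):Int) from rfl, PySem.Int.band_natCast, PySem.Int.band_natCast]
    have hn : n % 256 = t := by
      rw [Int.ofNat_eq_natCast] at h; omega
    rw [Nat.shiftRight_eq_div_pow, Nat.shiftRight_eq_div_pow, Nat.and_one_is_mod, Nat.and_one_is_mod]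
    have : (n / 2 ^ k) % 2 = (t / 2 ^ k) % 2 := by interval_cases k <;> omega
    rw [this]
  · have hl : (Int.negSucc n) >>> k = Int.negSucc (n >>> k) := rfl
    rw [hl, hr, band_negSucc_eval _ _ (by norm_num), show ((1:Int)) = ((1:Nat):Int) from rfl,
      PySem.Int.band_natCast, Int.toNat_natCast]
    rw [Nat.land_comm, Nat.shiftRight_eq_div_pow, Nat.and_one_is_mod,
      Nat.shiftRight_eq_div_pow, Nat.and_one_is_mod]
    have ht' : t = 255 - n % 256 := by omega
    have : ((1:Nat) : Int) - (((n / 2 ^ k) % 2 : Nat) : Int) = (((t / 2 ^ k) % 2 : Nat) : Int) := by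
      interval_cases k <;> omega
    exact this

set_option maxRecDepth 8000 in
theorem H2_90 : ∀ u, u < 256 → 90 - (90 &&& u) = (255 - u) &&& 90 := by decide

set_option maxRecDepth 8000 in
theorem H2_165 : ∀ u, u < 256 → 165 - (165 &&& u) = (255 - u) &&& 165 := by decide

set_option maxRecDepth 8000 in
theorem H2_255 : ∀ u, u < 256 → 255 - (255 &&& u) = (255 - u) &&& 255 := by decide

-- A's result depends only on dir_byte mod 256
theorem A_mod (d : Int) (t : Nat) (ht : t < 256) (h : d % 256 = (t : Int)) :
    fdup_magic d = fdup_magic ((t : Nat) : Int) := by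
  have b0 := bit_mod 0 (by norm_num) d t ht h
  have b1 := bit_mod 1 (by norm_num) d t ht h
  have b2 := bit_mod 2 (by norm_num) d t ht h
  have b3 := bit_mod 3 (by norm_num) d t ht h
  have b4 := bit_mod 4 (by norm_num) d t ht h
  have b5 := bit_mod 5 (by norm_num) d t ht h
  have b6 := bit_mod 6 (by norm_num) d t ht h
  have b7 := bit_mod 7 (by norm_num) d t ht h
  have m90 := band_mask_mod 90 (by norm_num) H2_90 d t ht h
  have m165 := band_mask_mod 165 (by norm_num) H2_165 d t ht h
  push_cast at m90 m165
  simp only [fdup_magic]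
  rw [b0, b1, b2, b3, b4, b5, b6, b7, m90, m165]

-- B's result depends only on dir_byte mod 256
theorem alt_mod (d : Int) (t : Nat) (ht : t < 256) (h : d % 256 = (t : Int)) :
    fdup_magic_alt d = fdup_magic_alt ((t : Nat) : Int) := by
  have m255 := band_mask_mod 255 (by norm_num) H2_255 d t ht h
  push_cast at m255
  simp only [fdup_magic_alt]
  rw [m255]

set_option maxRecDepth 100000 in
set_option maxHeartbeats 4000000 in
theorem key : ∀ t : Nat, t < 256 → fdup_magic ((t : Nat) : Int) = fdup_magic_alt ((t : Nat) : Int) := by decide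

-- ===== VERDICT (by name: the statement is the Claim_ definition above) =====
theorem fdup_magic_spec : Claim_equal_fdup_magic := by
  intro d _hdom _hpre
  unfold Spec_fdup_magic
  obtain ⟨t, ht, h⟩ : ∃ t : Nat, t < 256 ∧ d % 256 = (t : Int) :=
    ⟨(d % 256).toNat, by omega, by omega⟩
  rw [A_mod d t ht h, alt_mod d t ht h, key t ht]
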